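-- pv_equiv track=rewrite | github.com/softwarefairness/Intersectional_fairness | Rebuttal/InfoFair/src/utils/utils.py | encode_grouping
-- ===== SOURCE A (Python) =====
-- import itertools
--
-- def encode_grouping(attrs):
--     """
--     根据敏感属性组合生成分组编码.
--     假设每个敏感属性都只有两类：0 和 1.
--     """
--     # 每个属性都只有两类
--     groupings = [["0", "1"]] * len(attrs)
--
--     # 计算属性的笛卡尔积，生成所有可能的组
--     first = groupings[0]
--     for i in range(1, len(groupings)):
--         second = groupings[i]
--         first = list(itertools.product(first, second))
--         first = ["".join(x) for x in first]
--
--     # 创建组到索引的映射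
--     res = {k: v for v, k in enumerate(first)}
--     return res
-- ===== SOURCE B (Python) =====
-- def encode_grouping(attrs):
--     """
--     根据敏感属性组合生成分组编码.
--     假设每个敏感属性都只有两类：0 和 1.
--     """
--     n = len(attrs)
--     spec = '0{}b'.format(n)
--     return {format(i, spec): i for i in range(2 ** n)}
-- ===== Notes on version B (the rewrite author's own statement) =====
-- stated objective: simpler
-- what changed: B generates each n-bit key directly from its index with format(i,'0nb') over range(2**n), replacing A's iterated itertools.product/join fold and the enumerate-based dict build.
import Mathlib
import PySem

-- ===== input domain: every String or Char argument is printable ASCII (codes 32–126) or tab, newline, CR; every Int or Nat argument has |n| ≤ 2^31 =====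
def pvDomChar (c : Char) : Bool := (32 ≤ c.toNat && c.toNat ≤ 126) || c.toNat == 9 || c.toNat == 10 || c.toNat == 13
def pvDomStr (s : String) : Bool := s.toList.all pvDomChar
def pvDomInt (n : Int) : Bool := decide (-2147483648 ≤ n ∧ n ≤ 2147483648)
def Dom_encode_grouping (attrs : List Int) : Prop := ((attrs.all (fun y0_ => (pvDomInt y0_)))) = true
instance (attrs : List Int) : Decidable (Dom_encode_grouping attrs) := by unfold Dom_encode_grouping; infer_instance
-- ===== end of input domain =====

-- B generates each n-bit key directly from its index (format(i,'0nb') over range(2**n)) instead of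
-- folding itertools.product; objective: simpler.

-- ===== PORT A =====
def encode_grouping (attrs : List Int) : List (String × Int) :=
  let groupings : List (List String) := List.replicate attrs.length ["0", "1"]
  -- groupings[0]: IndexError on empty attrs, excluded by Pre_
  let first0 := (PySem.List.pyGet? groupings 0).getD []
  let first := (PySem.List.pyRange 1 (attrs.length : Int) 1).foldl
    (fun first i =>
      let second := (PySem.List.pyGet? groupings i).getD []
      let prod := first.flatMap (fun a => second.map (fun b => (a, b)))
      prod.map (fun x => PySem.Str.join "" [x.1, x.2])) first0
  ((PySem.List.enumerate first).foldl
    (fun (d : PySem.Dict String Int) vk => d.insert vk.2 vk.1)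
    PySem.Dict.empty).items

-- ===== PORT B =====
-- format(i, '0{}b'.format(w)): binary digits of i, left-padded with '0' to width w
def pvBinChars : Nat → List Char
  | 0 => []
  | n+1 => pvBinChars ((n+1) / 2) ++ [if (n+1) % 2 = 1 then '1' else '0']
decreasing_by exact Nat.div_lt_self (Nat.succ_pos n) (by norm_num)

def pvFmtChars (w i : Nat) : List Char :=
  let ds := if i = 0 then ['0'] else pvBinChars i
  List.replicate (w - ds.length) '0' ++ ds

def encode_grouping_alt (attrs : List Int) : List (String × Int) :=
  let n := attrs.length
  ((List.range (2 ^ n)).foldl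
    (fun (d : PySem.Dict String Int) i => d.insert (String.ofList (pvFmtChars n i)) (i : Int))
    PySem.Dict.empty).items

-- ===== PRECONDITION & SPEC =====
-- Pre_ excludes exactly the empty list, on which A raises IndexError (groupings[0]).
def Pre_encode_grouping (attrs : List Int) : Prop := attrs ≠ []
instance (attrs : List Int) : Decidable (Pre_encode_grouping attrs) := by unfold Pre_encode_grouping; infer_instance
def pvWitness_encode_grouping : List Int := [0]

def Spec_encode_grouping (attrs : List Int) (out : List (String × Int)) : Prop := out = encode_grouping_alt attrs
instance (attrs : List Int) (out : List (String × Int)) : Decidable (Spec_encode_grouping attrs out) := by unfold Spec_encode_grouping; infer_instance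

-- ===== CLAIM (what is proved, stated in full; the proofs are below) =====
def Claim_equal_encode_grouping : Prop := ∀ (attrs : List Int), Dom_encode_grouping attrs → Pre_encode_grouping attrs → Spec_encode_grouping attrs (encode_grouping attrs)

-- ===== LEMMAS AND PROOFS =====

theorem pvBinChars_zero : pvBinChars 0 = [] := by rw [pvBinChars]

theorem pvBinChars_one : pvBinChars 1 = ['1'] := by
  rw [pvBinChars]; norm_num [pvBinChars_zero]

theorem pvBinChars_two_mul_add (i b : Nat) (hb : b < 2) (h : 0 < 2 * i + b) :
    pvBinChars (2 * i + b) = pvBinChars i ++ [if b = 1 then '1' else '0'] := by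
  obtain ⟨m, hm⟩ : ∃ m, 2 * i + b = m + 1 := ⟨2 * i + b - 1, by omega⟩
  rw [hm, pvBinChars]
  have h1 : (m + 1) / 2 = i := by omega
  have h2 : (m + 1) % 2 = b := by omega
  rw [h1, h2]

theorem pvFmtChars_step (k i b : Nat) (hk : 1 ≤ k) (hb : b < 2) :
    pvFmtChars (k + 1) (2 * i + b) = pvFmtChars k i ++ [if b = 1 then '1' else '0'] := by
  have hrep : List.replicate k '0' = List.replicate (k - 1) '0' ++ ['0'] := by
    conv_lhs => rw [show k = (k - 1) + 1 from by omega]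
    rw [List.replicate_succ']
  by_cases hi : i = 0
  · subst hi
    interval_cases b
    · simp only [Nat.mul_zero, Nat.zero_add, pvFmtChars]
      norm_num
      rw [hrep]
      simp
    · simp only [Nat.mul_zero, Nat.zero_add, pvFmtChars]
      norm_num [pvBinChars_one]
      rw [hrep]
      simp
  · have hpos : 0 < 2 * i + b := by omega
    have hne : 2 * i + b ≠ 0 := by omega
    simp only [pvFmtChars, if_neg hne, if_neg hi]
    rw [pvBinChars_two_mul_add i b hb hpos]
    simp only [List.length_append, List.length_singleton]
    rw [show k + 1 - ((pvBinChars i).length + 1) = k - (pvBinChars i).length from by omega]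
    simp [List.append_assoc]

theorem pvRange_two_mul (m : Nat) :
    List.range (2 * m) = (List.range m).flatMap (fun i => [2 * i, 2 * i + 1]) := by
  induction m with
  | zero => rfl
  | succ m ih =>
      have : 2 * (m + 1) = (2 * m + 1) + 1 := by ring
      rw [this, List.range_succ, List.range_succ, ih, List.range_succ]
      simp

theorem pvJoin2 (a b : String) :
    PySem.Str.join "" [a, b] = String.ofList (a.toList ++ b.toList) := by
  apply String.toList_inj.mp
  simp [PySem.Str.toList_join, PySem.Chars.join, List.intercalate, List.intersperse]

theorem pvLoopA (n : Nat) (hn : 1 ≤ n) :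
    (PySem.List.pyRange 1 (n : Int) 1).foldl
      (fun first _ =>
        (first.flatMap (fun a => (["0", "1"] : List String).map (fun b => (a, b)))).map
          (fun x => PySem.Str.join "" [x.1, x.2]))
      ["0", "1"]
    = (List.range (2 ^ n)).map (fun i => String.ofList (pvFmtChars n i)) := by
  induction n, hn using Nat.le_induction with
  | base =>
      rw [show ((1 : Nat) : Int) = 1 from rfl, PySem.List.pyRange_one_eq_nil (le_refl 1)]
      have h0 : pvFmtChars 1 0 = ['0'] := rfl
      have h1 : pvFmtChars 1 1 = ['1'] := by simp [pvFmtChars, pvBinChars_one]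
      rw [show (2 : ℕ) ^ 1 = 2 from rfl]
      simp [List.range_succ, h0, h1]
  | succ n hn ih =>
      rw [show ((n + 1 : Nat) : Int) = (n : Int) + 1 from by push_cast; ring,
        PySem.List.pyRange_one_succ_right (by exact_mod_cast hn), List.foldl_append, ih]
      simp only [List.foldl_cons, List.foldl_nil]
      rw [show 2 ^ (n + 1) = 2 * 2 ^ n from by ring, pvRange_two_mul]
      simp only [List.map_flatMap, List.flatMap_map]
      have key : ∀ i : Nat,
          [PySem.Str.join "" [String.ofList (pvFmtChars n i), "0"],
           PySem.Str.join "" [String.ofList (pvFmtChars n i), "1"]]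
          = [String.ofList (pvFmtChars (n + 1) (2 * i)),
             String.ofList (pvFmtChars (n + 1) (2 * i + 1))] := by
        intro i
        have h0 := pvFmtChars_step n i 0 hn (by norm_num)
        have h1 := pvFmtChars_step n i 1 hn (by norm_num)
        norm_num at h0 h1
        rw [pvJoin2, pvJoin2]
        simp [h0, h1, show ("0" : String).toList = ['0'] from rfl,
          show ("1" : String).toList = ['1'] from rfl]
      simp only [List.map_cons, List.map_nil, key]

theorem pvEnumMap {α β : Type} (l : List α) (f : α → β) (s : Int) :
    PySem.List.enumerate (l.map f) s = (PySem.List.enumerate l s).map (fun p => (p.1, f p.2)) := by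
  induction l generalizing s with
  | nil => rfl
  | cons x xs ih => simp [PySem.List.enumerate_cons, ih]

theorem pvEnumAppend {α : Type} (xs ys : List α) (s : Int) :
    PySem.List.enumerate (xs ++ ys) s
    = PySem.List.enumerate xs s ++ PySem.List.enumerate ys (s + xs.length) := by
  induction xs generalizing s with
  | nil => simp [PySem.List.enumerate_nil]
  | cons x xs ih =>
      simp [PySem.List.enumerate_cons, ih]
      ring_nf

theorem pvEnumRange (m : Nat) :
    PySem.List.enumerate (List.range m) 0 = (List.range m).map (fun i : Nat => ((i : Int), i)) := by
  induction m with
  | zero => rfl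
  | succ m ih =>
      rw [List.range_succ, pvEnumAppend, ih]
      simp [PySem.List.enumerate_cons, PySem.List.enumerate_nil]

-- ===== VERDICT (by name: the statement is the Claim_ definition above) =====
theorem pvStep_eq (n : Nat) (acc : List String) (x : Int) (hx : x ∈ PySem.List.pyRange 1 (n : Int) 1) :
    (fun (first : List String) (i : Int) =>
      let second := (PySem.List.pyGet? (List.replicate n (["0", "1"] : List String)) i).getD []
      let prod := first.flatMap (fun a => second.map (fun b => (a, b)))
      prod.map (fun x => PySem.Str.join "" [x.1, x.2])) acc x
    = (fun (first : List String) (_ : Int) =>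
        (first.flatMap (fun a => (["0", "1"] : List String).map (fun b => (a, b)))).map
          (fun x => PySem.Str.join "" [x.1, x.2])) acc x := by
  rw [PySem.List.mem_pyRange_one] at hx
  have hget : PySem.List.pyGet? (List.replicate n (["0", "1"] : List String)) x = some ["0", "1"] := by
    have h0 : (0 : Int) ≤ x := by omega
    have hxn : x < (n : Int) := hx.2
    have hlt : x.toNat < n := by omega
    simp [PySem.List.pyGet?, PySem.List.pyIdx?, h0, hxn, List.getElem?_replicate, hlt]
  simp only [hget, Option.getD_some]

theorem pvGet0 (n : Nat) (hn : 1 ≤ n) :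
    PySem.List.pyGet? (List.replicate n (["0", "1"] : List String)) 0 = some ["0", "1"] := by
  have h0 : 0 < n := hn
  simp [PySem.List.pyGet?, PySem.List.pyIdx?, h0, List.getElem?_replicate]

theorem encode_grouping_spec : Claim_equal_encode_grouping := by
  intro attrs _ hpre
  unfold Spec_encode_grouping encode_grouping encode_grouping_alt
  have hn : 1 ≤ attrs.length := List.length_pos_iff.mpr hpre
  simp only [pvGet0 attrs.length hn, Option.getD_some]
  rw [PySem.List.foldl_congr_mem _ _ _ _ (fun acc x hx => pvStep_eq attrs.length acc x hx),
    pvLoopA attrs.length hn, pvEnumMap, pvEnumRange, List.map_map, List.foldl_map]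
  rfl
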